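-- pv_equiv track=rewrite | github.com/joaonery1/InterpreterWorkFlow | novografo.py | gerar_caminhos
-- ===== SOURCE A (Python) =====
-- def gerar_caminhos(grafo, caminho, final):
--     """Enumera todos os caminhos no grafo `grafo` iniciados por `caminho` e que terminam no vértice `final`."""
--
--     # Se o caminho de fato atingiu o vértice final, não há o que fazer.
--     if caminho[-1] == final:
--         yield caminho
--         return
--
--     # Procuramos todos os vértices para os quais podemos avançar…
--     for vizinho in G[caminho[-1]]:
--         # …mas não podemos visitar um vértice que já está no caminho.
--         if vizinho in caminho:
--             continue
--         # Se você estiver usando python3, você pode substituir o for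
--         # pela linha "yield from gerar_caminhos(grafo, caminho + [vizinho], final)"
--         for caminho_maior in gerar_caminhos(grafo, caminho + [vizinho], final):
--             yield caminho_maior
--
-- G = {'A': ['B', 'C'], 'B': ['A', 'C', 'D'], 'C': ['A', 'B', 'D'], 'D': ['B', 'C']}
-- ===== SOURCE B (Python) =====
-- def gerar_caminhos(grafo, caminho, final):
--     """Iterative DFS with an explicit stack of partial paths (same yield order as the recursion)."""
--     stack = [caminho]
--     while stack:
--         path = stack.pop()
--         if path[-1] == final:
--             yield path
--             continue
--         for vizinho in reversed(G[path[-1]]):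
--             if vizinho in path:
--                 continue
--             stack.append(path + [vizinho])
--
-- G = {'A': ['B', 'C'], 'B': ['A', 'C', 'D'], 'C': ['A', 'B', 'D'], 'D': ['B', 'C']}
-- ===== Notes on version B (the rewrite author's own statement) =====
-- stated objective: alternative
-- what changed: The recursive generator is replaced by an iterative DFS over an explicit stack of partial paths, pushing the (reversed) unvisited neighbours of the popped path's last vertex, which reproduces the recursion's pre-order yield sequence without recursion.
import Mathlib
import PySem

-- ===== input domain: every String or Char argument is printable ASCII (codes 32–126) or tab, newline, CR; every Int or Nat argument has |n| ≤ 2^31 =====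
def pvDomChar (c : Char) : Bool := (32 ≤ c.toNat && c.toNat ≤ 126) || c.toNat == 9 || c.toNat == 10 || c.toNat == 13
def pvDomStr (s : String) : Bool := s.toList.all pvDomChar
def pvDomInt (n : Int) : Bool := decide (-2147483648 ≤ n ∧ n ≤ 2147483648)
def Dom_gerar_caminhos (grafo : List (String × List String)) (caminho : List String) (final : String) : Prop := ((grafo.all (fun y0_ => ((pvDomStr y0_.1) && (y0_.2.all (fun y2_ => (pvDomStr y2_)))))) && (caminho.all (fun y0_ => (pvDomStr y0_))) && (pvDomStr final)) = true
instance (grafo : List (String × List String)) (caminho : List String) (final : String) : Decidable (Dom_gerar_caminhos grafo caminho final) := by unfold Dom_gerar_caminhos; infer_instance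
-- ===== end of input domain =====

-- B replaces the recursive generator by an iterative DFS over an explicit stack of partial
-- paths (alternative decomposition, same cost); both use the module-level global G, not `grafo`.

-- ===== PORT A =====
-- the module-level dict G (both A and B read it; the `grafo` parameter is unused by A)
def pvG : PySem.Dict String (List String) :=
  PySem.Dict.mk [("A", ["B", "C"]), ("B", ["A", "C", "D"]), ("C", ["A", "B", "D"]), ("D", ["B", "C"])]

-- G[v]; the KeyError case (none) is excluded by Pre_, the default [] is never reached there
def pvNbrs (v : String) : List String := (PySem.Dict.get? pvG v).getD []

-- A's recursion; the paths appended by the recursion are vertices of the 4-vertex global G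
-- not yet on the path, so recursion depth from any start is < 5: fuel 5 is a pure totality
-- guard, never exhausted (proved in genA_stable below).
def genA : Nat → List String → String → List (List String)
  | 0, _, _ => []
  | fuel + 1, caminho, final =>
    match caminho.getLast? with
    | none => []   -- caminho[-1] IndexError: excluded by Pre_
    | some last =>
      if last = final then [caminho]
      else
        (pvNbrs last).foldl
          (fun acc vizinho =>
            if caminho.contains vizinho then acc
            else acc ++ genA fuel (caminho ++ [vizinho]) final) []

def gerar_caminhos (grafo : List (String × List String)) (caminho : List String) (final : String) : List (List String) :=
  genA 5 caminho final

-- ===== PORT B =====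
-- the while-loop of Source B: the stack holds partial paths, top at the head (Python appends and
-- pops at the end; Source B pushes the REVERSED neighbour list one by one, which leaves the
-- neighbours on the stack in original order with the first neighbour on top — exactly the
-- `filter`-ed list prepended here).  Fuel 2000 is a totality guard; each iteration pops once
-- and the DFS tree over the 4-vertex G is finite (≤ 4^5 nodes from any stack entry).
def loopB : Nat → List (List String) → String → List (List String) → List (List String)
  | 0, _, _, out => out
  | _ + 1, [], _, out => out
  | fuel + 1, path :: rest, final, out =>
    match path.getLast? with
    | none => loopB fuel rest final out   -- path[-1] IndexError: excluded by Pre_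
    | some last =>
      if last = final then loopB fuel rest final (out ++ [path])
      else
        loopB fuel
          ((((pvNbrs last).filter (fun v => !path.contains v)).map (fun v => path ++ [v])) ++ rest)
          final out

def gerar_caminhos_alt (grafo : List (String × List String)) (caminho : List String) (final : String) : List (List String) :=
  loopB 2000 [caminho] final []

-- ===== PRECONDITION & SPEC =====
-- Pre_ excludes exactly the inputs where the Python raises: an empty caminho (IndexError on
-- caminho[-1]) and a caminho whose last vertex is neither `final` nor a key of the global G
-- (KeyError on G[caminho[-1]]); deeper recursion only reaches keys of G, so no other input raises.
def Pre_gerar_caminhos (grafo : List (String × List String)) (caminho : List String) (final : String) : Prop :=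
  caminho ≠ [] ∧ (caminho.getLastD "" = final ∨ caminho.getLastD "" ∈ (["A", "B", "C", "D"] : List String))
instance (grafo : List (String × List String)) (caminho : List String) (final : String) : Decidable (Pre_gerar_caminhos grafo caminho final) := by unfold Pre_gerar_caminhos; infer_instance

def pvWitness_gerar_caminhos : (List (String × List String)) × List String × String :=
  ([("A", ["B", "C"])], ["A"], "D")

def Spec_gerar_caminhos (grafo : List (String × List String)) (caminho : List String) (final : String) (out : List (List String)) : Prop := out = gerar_caminhos_alt grafo caminho final
instance (grafo : List (String × List String)) (caminho : List String) (final : String) (out : List (List String)) : Decidable (Spec_gerar_caminhos grafo caminho final out) := by unfold Spec_gerar_caminhos; infer_instance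

-- ===== CLAIM (what is proved, stated in full; the proofs are below) =====
def Claim_equal_gerar_caminhos : Prop := ∀ (grafo : List (String × List String)) (caminho : List String) (final : String), Dom_gerar_caminhos grafo caminho final → Pre_gerar_caminhos grafo caminho final → Spec_gerar_caminhos grafo caminho final (gerar_caminhos grafo caminho final)

-- ===== LEMMAS AND PROOFS =====

-- number of vertices of G still missing from the path (counted per vertex, 0..4)
def pvMissing (p : List String) : Nat :=
  (if p.contains "A" then 0 else 1) + (if p.contains "B" then 0 else 1) +
  (if p.contains "C" then 0 else 1) + (if p.contains "D" then 0 else 1)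

lemma pvMissing_le (p : List String) : pvMissing p ≤ 4 := by
  unfold pvMissing; split_ifs <;> omega

lemma pvNbrs_mem (last v : String) (h : v ∈ pvNbrs last) :
    v ∈ (["A", "B", "C", "D"] : List String) := by
  simp only [pvNbrs, pvG, PySem.Dict.get?_mk_cons] at h
  split_ifs at h <;> simp_all [PySem.Dict.get?, List.find?] <;> tauto

lemma pvNbrs_len (last : String) : (pvNbrs last).length ≤ 3 := by
  simp only [pvNbrs, pvG, PySem.Dict.get?_mk_cons]
  split_ifs <;> simp [PySem.Dict.get?, List.find?]

lemma pvMissing_append (p : List String) (v : String)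
    (hv : v ∈ (["A", "B", "C", "D"] : List String)) (hnp : ¬ p.contains v = true) :
    pvMissing (p ++ [v]) + 1 = pvMissing p := by
  unfold pvMissing
  simp only [List.contains_append, List.contains_cons, Bool.or_eq_true] at *
  fin_cases hv <;> simp_all <;> split_ifs <;> simp_all

-- one-step unfolding of genA at positive fuel
lemma genA_succ (fuel : Nat) (caminho : List String) (final : String) :
    genA (fuel + 1) caminho final =
      match caminho.getLast? with
      | none => []
      | some last =>
        if last = final then [caminho]
        else
          (pvNbrs last).foldl
            (fun acc vizinho =>
              if caminho.contains vizinho then acc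
              else acc ++ genA fuel (caminho ++ [vizinho]) final) [] := rfl

-- fuel stability: any fuel above the number of missing vertices computes the same result
lemma genA_stable : ∀ (m : Nat) (p : List String) (final : String) (f g : Nat),
    pvMissing p ≤ m → pvMissing p ≤ f → pvMissing p ≤ g → genA (f + 1) p final = genA (g + 1) p final := by
  intro m
  induction m with
  | zero =>
    intro p final f g hm hf hg
    rw [genA_succ, genA_succ]
    cases hl : p.getLast? with
    | none => rfl
    | some last =>
      simp only []
      by_cases hfin : last = final
      · simp [hfin]
      · simp only [if_neg hfin]
        apply PySem.List.foldl_congr_mem'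
        intro v hv acc
        split_ifs with hin
        · rfl
        · exfalso
          have hc : ¬ p.contains v = true := by simpa using hin
          have := pvMissing_append p v (pvNbrs_mem last v hv) hc
          omega
  | succ m ih =>
    intro p final f g hm hf hg
    rw [genA_succ, genA_succ]
    cases hl : p.getLast? with
    | none => rfl
    | some last =>
      simp only []
      by_cases hfin : last = final
      · simp [hfin]
      · simp only [if_neg hfin]
        apply PySem.List.foldl_congr_mem'
        intro v hv acc
        split_ifs with hin
        · rfl
        · have hc : ¬ p.contains v = true := by simpa using hin
          have hma := pvMissing_append p v (pvNbrs_mem last v hv) hc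
          obtain ⟨f', rfl⟩ : ∃ f', f = f' + 1 := ⟨f - 1, by omega⟩
          obtain ⟨g', rfl⟩ : ∃ g', g = g' + 1 := ⟨g - 1, by omega⟩
          rw [ih (p ++ [v]) final f' g' (by omega) (by omega) (by omega)]

-- cost of exploring the DFS tree rooted at a partial path (bounds loop iterations)
def pvCost (p : List String) : Nat := 4 ^ (pvMissing p + 1)

def pvStackCost (s : List (List String)) : Nat := (s.map pvCost).sum

lemma pvCost_pos (p : List String) : 1 ≤ pvCost p := Nat.one_le_pow _ _ (by omega)

-- unfolding genA 5 in the non-final case into a flatMap over the filtered neighbours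
lemma genA_five_unfold (p : List String) (last final : String)
    (hl : p.getLast? = some last) (hfin : last ≠ final) :
    genA 5 p final =
      (((pvNbrs last).filter (fun v => !p.contains v)).map (fun v => p ++ [v])).flatMap
        (fun c => genA 5 c final) := by
  show genA (4 + 1) p final = _
  rw [genA_succ]
  simp only [hl, if_neg hfin]
  have hcong :
      (pvNbrs last).foldl (fun acc vizinho =>
        if p.contains vizinho then acc else acc ++ genA 4 (p ++ [vizinho]) final) []
      = (pvNbrs last).foldl (fun acc vizinho =>
        if p.contains vizinho then acc else acc ++ genA 5 (p ++ [vizinho]) final) [] := by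
    apply PySem.List.foldl_congr_mem'
    intro v hv acc
    split_ifs with hin
    · rfl
    · have hc : ¬ p.contains v = true := by simpa using hin
      have hma := pvMissing_append p v (pvNbrs_mem last v hv) hc
      have h4 : pvMissing p ≤ 4 := pvMissing_le p
      rw [show (4 : Nat) = 3 + 1 from rfl,
        genA_stable 3 (p ++ [v]) final 3 4 (by omega) (by omega) (by omega)]
  rw [hcong]
  have : ∀ (l : List String) (acc : List (List String)),
      l.foldl (fun acc vizinho =>
        if p.contains vizinho then acc else acc ++ genA 5 (p ++ [vizinho]) final) acc
      = acc ++ ((l.filter (fun v => !p.contains v)).map (fun v => p ++ [v])).flatMap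
          (fun c => genA 5 c final) := by
    intro l
    induction l with
    | nil => intro acc; simp
    | cons x xs ihx =>
      intro acc
      by_cases hcm : x ∈ p
      · have ihx' := ihx acc
        simp only [List.foldl_cons, List.filter_cons] at *
        simp [hcm] at ihx' ⊢
        exact ihx'
      · have ihx' := ihx (acc ++ genA 5 (p ++ [x]) final)
        simp only [List.foldl_cons, List.filter_cons] at *
        simp [hcm] at ihx' ⊢
        simp [ihx']
  simpa using this (pvNbrs last) []

lemma pvChildren_cost (p : List String) (last : String) :
    pvStackCost (((pvNbrs last).filter (fun v => !p.contains v)).map (fun v => p ++ [v])) + 1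
      ≤ pvCost p := by
  have hbound : ∀ x ∈ ((((pvNbrs last).filter (fun v => !p.contains v)).map (fun v => p ++ [v])).map pvCost),
      x ≤ 4 ^ pvMissing p := by
    intro x hx
    simp only [List.mem_map, List.mem_filter] at hx
    obtain ⟨c, ⟨v, ⟨hvm, hvc⟩, rfl⟩, rfl⟩ := hx
    have hma := pvMissing_append p v (pvNbrs_mem last v hvm) (by simpa using hvc)
    unfold pvCost
    rw [hma]
  have hsum := List.sum_le_card_nsmul _ _ hbound
  have hlen : ((((pvNbrs last).filter (fun v => !p.contains v)).map (fun v => p ++ [v])).map pvCost).length ≤ 3 := by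
    simp only [List.length_map]
    exact le_trans (List.length_filter_le _ _) (pvNbrs_len last)
  have h1 : 1 ≤ 4 ^ pvMissing p := Nat.one_le_pow _ _ (by omega)
  have hs2 : pvStackCost (((pvNbrs last).filter (fun v => !p.contains v)).map (fun v => p ++ [v]))
      ≤ 3 * 4 ^ pvMissing p := by
    unfold pvStackCost
    calc ((((pvNbrs last).filter (fun v => !p.contains v)).map (fun v => p ++ [v])).map pvCost).sum
        ≤ ((((pvNbrs last).filter (fun v => !p.contains v)).map (fun v => p ++ [v])).map pvCost).length
            • 4 ^ pvMissing p := hsum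
      _ = ((((pvNbrs last).filter (fun v => !p.contains v)).map (fun v => p ++ [v])).map pvCost).length
            * 4 ^ pvMissing p := smul_eq_mul _ _
      _ ≤ 3 * 4 ^ pvMissing p := Nat.mul_le_mul_right _ hlen
  show _ + 1 ≤ 4 ^ (pvMissing p + 1)
  rw [pow_succ]
  omega

-- main loop invariant: with enough fuel, the stack loop appends the flatMap of genA 5
lemma loopB_eq : ∀ (fuel : Nat) (stack : List (List String)) (final : String)
    (out : List (List String)), pvStackCost stack ≤ fuel →
    loopB fuel stack final out = out ++ stack.flatMap (fun p => genA 5 p final) := by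
  intro fuel
  induction fuel with
  | zero =>
    intro stack final out h
    cases stack with
    | nil => simp [loopB]
    | cons p rest =>
      exfalso
      have := pvCost_pos p
      simp [pvStackCost] at h
      omega
  | succ fuel ih =>
    intro stack final out h
    cases stack with
    | nil => simp [loopB]
    | cons p rest =>
      have hcost : pvCost p + pvStackCost rest ≤ fuel + 1 := by
        simpa [pvStackCost] using h
      have hp1 := pvCost_pos p
      simp only [loopB]
      cases hl : p.getLast? with
      | none =>
        have hg : genA 5 p final = [] := by
          show genA (4 + 1) p final = []
          rw [genA_succ]; simp [hl]
        rw [ih rest final out (by omega)]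
        simp [hg]
      | some last =>
        simp only []
        by_cases hfin : last = final
        · have hg : genA 5 p final = [p] := by
            show genA (4 + 1) p final = [p]
            simp [genA, hl, hfin]
          rw [if_pos hfin, ih rest final (out ++ [p]) (by omega)]
          simp [hg]
        · rw [if_neg hfin]
          set children := ((pvNbrs last).filter (fun v => !p.contains v)).map (fun v => p ++ [v]) with hch
          have hchcost : pvStackCost children + 1 ≤ pvCost p := by
            rw [hch]; exact pvChildren_cost p last
          rw [ih (children ++ rest) final out (by
            have : pvStackCost (children ++ rest) = pvStackCost children + pvStackCost rest := by
              simp [pvStackCost]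
            omega)]
          simp only [List.flatMap_cons, List.flatMap_append]
          rw [genA_five_unfold p last final hl hfin, hch]

-- ===== VERDICT (by name: the statement is the Claim_ definition above) =====
theorem gerar_caminhos_spec : Claim_equal_gerar_caminhos := by
  intro grafo caminho final _ _
  unfold Spec_gerar_caminhos gerar_caminhos gerar_caminhos_alt
  rw [loopB_eq 2000 [caminho] final [] (by
    have h := pvMissing_le caminho
    have : pvCost caminho ≤ 4 ^ 5 := by
      unfold pvCost; exact Nat.pow_le_pow_right (by omega) (by omega)
    simp [pvStackCost]
    omega)]
  simp
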